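-- pv_equiv track=rewrite | github.com/MCasakufe/LeetCode | Problems/2529/code.py | negative_binarySearch
-- ===== SOURCE A (Python) =====
-- def negative_binarySearch(nums):
--     left = 0
--     right = len(nums)
--     while left < right:
--         mid = (left + right) // 2
--         if nums[mid] < 0:
--             left = mid + 1
--         else:
--             right = mid
--     if left - 1 < 0 or nums[left - 1] >= 0:
--         return None
--     return left - 1
-- ===== SOURCE B (Python) =====
-- def negative_binarySearch(nums):
--     def go(offset, sub):
--         if not sub:
--             return offset
--         mid = len(sub) // 2
--         if sub[mid] < 0:
--             return go(offset + mid + 1, sub[mid + 1:])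
--         return go(offset, sub[:mid])
--     boundary = go(0, nums)
--     return boundary - 1 if boundary > 0 and nums[boundary - 1] < 0 else None
-- ===== Notes on version B (the rewrite author's own statement) =====
-- stated objective: alternative
-- what changed: A's iterative binary search over index pair (left,right) is replaced by structural recursion over list slices: a helper go(offset, sub) splits the sublist at its own midpoint and recurses on sub[mid+1:] or sub[:mid] with an offset accumulator; the midpoint identity (l+r)//2 = l + (r-l)//2 makes the probe sequence identical, so the results agree on every input.
import Mathlib
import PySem

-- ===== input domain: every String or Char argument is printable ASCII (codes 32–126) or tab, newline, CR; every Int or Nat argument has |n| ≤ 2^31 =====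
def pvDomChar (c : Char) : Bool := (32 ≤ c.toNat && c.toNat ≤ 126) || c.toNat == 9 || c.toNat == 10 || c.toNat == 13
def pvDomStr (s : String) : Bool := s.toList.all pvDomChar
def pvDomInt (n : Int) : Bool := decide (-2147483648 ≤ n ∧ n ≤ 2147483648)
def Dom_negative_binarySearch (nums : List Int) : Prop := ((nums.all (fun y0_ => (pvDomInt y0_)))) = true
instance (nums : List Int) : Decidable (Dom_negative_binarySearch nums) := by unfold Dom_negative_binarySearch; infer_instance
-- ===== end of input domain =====

-- B replaces A's index-pair while-loop by structural recursion over list slices with an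
-- offset accumulator (alternative decomposition; same probe sequence, hence same result).

-- ===== PORT A =====
-- the while loop of A: state (left, right); indices stay in range so pyGetD's default is never used
def pvLoopA (nums : List Int) (left right : Int) : Int :=
  if _h : left < right then
    let mid := PySem.Int.floordiv (left + right) 2
    if PySem.List.pyGetD nums mid 0 < 0 then pvLoopA nums (mid + 1) right
    else pvLoopA nums left mid
  else left
termination_by (right - left).toNat
decreasing_by all_goals
  have h2 := (PySem.Int.floordiv_lt_iff_lt_mul (a := left + right) (b := 2) (q := right) (by omega)).mpr (by omega)
  have h1 := (PySem.Int.le_floordiv_iff_mul_le (a := left + right) (b := 2) (q := left) (by omega)).mpr (by omega)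
  omega

def negative_binarySearch (nums : List Int) : Option Int :=
  let left := pvLoopA nums 0 (PySem.List.len nums)
  if left - 1 < 0 ∨ PySem.List.pyGetD nums (left - 1) 0 ≥ 0 then none
  else some (left - 1)

-- ===== PORT B =====
-- go(offset, sub) of Source B: recursion on the sublist itself, splitting it at its midpoint
def pvGoB (off : Int) (sub : List Int) : Int :=
  if sub.isEmpty then off
  else
    let mid := PySem.Int.floordiv (PySem.List.len sub) 2
    if PySem.List.pyGetD sub mid 0 < 0 then
      pvGoB (off + mid + 1) (PySem.List.slice sub (some (mid + 1)) none)
    else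
      pvGoB off (PySem.List.slice sub none (some mid))
termination_by sub.length
decreasing_by all_goals
  · have hlen : 0 < sub.length := by
      rcases sub with _ | ⟨x, t⟩
      · simp_all
      · simp
    have hmid : PySem.Int.floordiv (PySem.List.len sub) 2 = ((sub.length / 2 : Nat) : Int) := by
      exact_mod_cast PySem.Int.floordiv_natCast sub.length 2
    first
    | (rw [hmid, show ((sub.length / 2 : Nat) : Int) + 1 = ((sub.length / 2 + 1 : Nat) : Int) by push_cast; ring,
          PySem.List.slice_from_natCast]
       simp only [List.length_drop]
       omega)
    | (rw [hmid, PySem.List.slice_to_natCast]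
       simp only [List.length_take]
       omega)

def negative_binarySearch_alt (nums : List Int) : Option Int :=
  let boundary := pvGoB 0 nums
  if boundary > 0 ∧ PySem.List.pyGetD nums (boundary - 1) 0 < 0 then some (boundary - 1)
  else none

-- ===== PRECONDITION & SPEC =====
def Spec_negative_binarySearch (nums : List Int) (out : Option Int) : Prop := out = negative_binarySearch_alt nums
instance (nums : List Int) (out : Option Int) : Decidable (Spec_negative_binarySearch nums out) := by unfold Spec_negative_binarySearch; infer_instance

-- ===== CLAIM (what is proved, stated in full; the proofs are below) =====
def Claim_equal_negative_binarySearch : Prop := ∀ (nums : List Int), Dom_negative_binarySearch nums → Spec_negative_binarySearch nums (negative_binarySearch nums)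

-- ===== LEMMAS AND PROOFS =====

-- B's slice recursion, started on the window nums[a:b], equals A's loop on (a, b):
-- the midpoint identity (a+b)//2 = a + (b-a)//2 makes the probe sequences coincide.
theorem pvGoB_eq (nums : List Int) (a b : Nat) (hab : a ≤ b) (hb : b ≤ nums.length) :
    pvGoB (a : Int) ((nums.drop a).take (b - a)) = pvLoopA nums (a : Int) (b : Int) := by
  rw [pvGoB, pvLoopA]
  by_cases h : a < b
  · have hlsub : ((nums.drop a).take (b - a)).length = b - a := by
      simp [List.length_take, List.length_drop]; omega
    have hne : ((nums.drop a).take (b - a)).isEmpty = false := by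
      rw [List.isEmpty_eq_false_iff]
      intro hnil; rw [hnil] at hlsub; simp at hlsub; omega
    rw [if_neg (by simp [hne]), dif_pos (show (a:Int) < (b:Int) by exact_mod_cast h)]
    have hlen : PySem.List.len ((nums.drop a).take (b - a)) = ((b - a : Nat) : Int) := by
      simp [PySem.List.len, hlsub]
    have hmB : PySem.Int.floordiv (PySem.List.len ((nums.drop a).take (b - a))) 2
        = (((b - a) / 2 : Nat) : Int) := by
      rw [hlen]; exact_mod_cast PySem.Int.floordiv_natCast (b - a) 2
    have hmA : PySem.Int.floordiv ((a : Int) + (b : Int)) 2 = (((a + b) / 2 : Nat) : Int) := by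
      rw [show (a:Int)+(b:Int) = ((a+b : Nat) : Int) by push_cast; ring]
      exact_mod_cast PySem.Int.floordiv_natCast (a + b) 2
    have hidx : a + (b - a) / 2 = (a + b) / 2 := by omega
    have hprobe : PySem.List.pyGetD ((nums.drop a).take (b - a)) (((b - a) / 2 : Nat) : Int) 0
        = PySem.List.pyGetD nums (((a + b) / 2 : Nat) : Int) 0 := by
      rw [PySem.List.pyGetD_natCast, PySem.List.pyGetD_natCast]
      rw [List.getD_eq_getElem _ _ (by omega : (b - a) / 2 < ((nums.drop a).take (b - a)).length)]
      rw [List.getD_eq_getElem _ _ (by omega : (a + b) / 2 < nums.length)]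
      simp [List.getElem_take, List.getElem_drop, hidx]
    simp only [hmB, hmA, hprobe]
    split
    · -- negative branch
      have e1 : (a : Int) + (((b - a) / 2 : Nat) : Int) + 1 = (((a + b) / 2 + 1 : Nat) : Int) := by
        omega
      have e2 : PySem.List.slice ((nums.drop a).take (b - a)) (some ((((b - a) / 2 : Nat) : Int) + 1)) none
          = (nums.drop ((a + b) / 2 + 1)).take (b - ((a + b) / 2 + 1)) := by
        rw [show ((((b - a) / 2 : Nat) : Int) + 1) = (((b - a) / 2 + 1 : Nat) : Int) by push_cast; ring,
            PySem.List.slice_from_natCast, List.drop_take, List.drop_drop]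
        rw [show b - a - ((b - a) / 2 + 1) = b - ((a + b) / 2 + 1) by omega,
            show a + ((b - a) / 2 + 1) = (a + b) / 2 + 1 by omega]
      rw [e1, e2, show (((a + b) / 2 : Nat) : Int) + 1 = (((a + b) / 2 + 1 : Nat) : Int) by push_cast; ring]
      exact pvGoB_eq nums ((a + b) / 2 + 1) b (by omega) hb
    · have e2 : PySem.List.slice ((nums.drop a).take (b - a)) none (some (((b - a) / 2 : Nat) : Int))
          = (nums.drop a).take ((a + b) / 2 - a) := by
        rw [PySem.List.slice_to_natCast, List.take_take]
        congr 1; omega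
      rw [e2, show (((a + b) / 2 : Nat) : Int) = (((a + b) / 2 : Nat) : Int) from rfl]
      exact pvGoB_eq nums a ((a + b) / 2) (by omega) (by omega)
  · have hab' : a = b := by omega
    rw [if_pos (by subst hab'; simp), dif_neg (by exact_mod_cast h)]
termination_by b - a
decreasing_by all_goals omega

-- ===== VERDICT (by name: the statement is the Claim_ definition above) =====
theorem negative_binarySearch_spec : Claim_equal_negative_binarySearch := by
  intro nums _
  unfold Spec_negative_binarySearch negative_binarySearch negative_binarySearch_alt
  have h := pvGoB_eq nums 0 nums.length (by omega) (le_refl _)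
  simp only [Nat.cast_zero, Nat.sub_zero, List.drop_zero, List.take_length] at h
  rw [show PySem.List.len nums = (nums.length : Int) from rfl, ← h]
  simp only []
  split_ifs with h1 h2 h2
  · omega
  · rfl
  · rfl
  · omega
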